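-- pv_equiv track=rewrite | github.com/idjAlertLogic/pgsanity | pgsanity/sqlprep.py | get_next_occurrence
-- ===== SOURCE A (Python) =====
-- def get_next_occurrence(haystack, offset, needles):
--     """find next occurrence of one of the needles in the haystack
--        return: tuple of (index, needle found)
--            or: None if no needle was found"""
--     # make map of first char to full needle (only works if all needles
--     # have different first characters)
--     firstcharmap = dict([(n[0], n) for n in needles])
--     firstchars = firstcharmap.keys()
--     while offset < len(haystack):
--         if haystack[offset] in firstchars:
--             possible_needle = firstcharmap[haystack[offset]]
--             if haystack[offset:offset + len(possible_needle)] == possible_needle: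
--                 return (offset, possible_needle)
--         offset += 1
--     return None
-- ===== SOURCE B (Python) =====
-- def get_next_occurrence(haystack, offset, needles):
--     """find next occurrence of one of the needles in the haystack
--        return: tuple of (index, needle found)
--            or: None if no needle was found"""
--     # same first-char -> needle collapse as the original (last needle wins
--     # per first character); then one str.find per surviving needle and
--     # take the minimal position
--     firstcharmap = dict([(n[0], n) for n in needles])
--     best = None
--     for needle in firstcharmap.values():
--         pos = haystack.find(needle, offset)
--         if pos != -1 and (best is None or pos < best[0]):
--             best = (pos, needle)
--     return best
-- ===== Notes on version B (the rewrite author's own statement) =====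
-- stated objective: alternative
-- what changed: Instead of scanning haystack position by position, B keeps the same first-char->needle map and issues one haystack.find(needle, offset) per surviving needle, returning the pair with the minimal position (unique because surviving needles have distinct first characters).
-- outside the precondition, e.g. on get_next_occurrence('ab', -1, ['a']): A returns (0, 'a'), B returns None
import Mathlib
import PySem

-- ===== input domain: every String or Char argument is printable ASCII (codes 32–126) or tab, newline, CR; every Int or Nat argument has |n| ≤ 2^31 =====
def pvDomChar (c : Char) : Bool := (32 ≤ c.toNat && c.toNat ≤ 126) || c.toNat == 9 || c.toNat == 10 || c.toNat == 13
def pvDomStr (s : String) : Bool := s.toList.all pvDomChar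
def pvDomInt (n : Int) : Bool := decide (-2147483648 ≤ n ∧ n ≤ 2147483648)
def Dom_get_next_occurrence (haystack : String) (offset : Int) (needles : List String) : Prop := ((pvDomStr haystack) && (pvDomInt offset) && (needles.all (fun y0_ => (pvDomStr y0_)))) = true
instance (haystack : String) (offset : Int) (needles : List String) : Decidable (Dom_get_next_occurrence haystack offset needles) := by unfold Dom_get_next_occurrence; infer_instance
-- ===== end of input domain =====

-- B replaces A's Python-level position-by-position scan with one str.find per
-- surviving needle of the same first-char map, taking the minimal position.

-- ===== PORT A =====
-- shared line of both Pythons: firstcharmap = dict([(n[0], n) for n in needles]);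
-- n[0] is PySem.Str.pyGet? n 0 (none = IndexError on an empty needle, excluded by
-- Pre_; the '.getD' default is never reached under Pre_)
def firstCharMap (needles : List String) : PySem.Dict Char String :=
  needles.foldl (fun d n => d.insert ((PySem.Str.pyGet? n 0).getD ' ') n) PySem.Dict.empty

-- A's while loop over offset
def goA (cs : List Char) (m : PySem.Dict Char String) (offset : Int) : Option (Int × String) :=
  if offset < (cs.length : Int) then
    match PySem.List.pyGet? cs offset with
    | none => none      -- Python raises IndexError here (offset < -len(haystack)); outside Pre_
    | some c =>
      match m.get? c with    -- 'haystack[offset] in firstchars' and the lookup, combined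
      | some needle =>
          if PySem.List.slice cs (some offset) (some (offset + (PySem.Str.len needle : Int))) = needle.toList
          then some (offset, needle)
          else goA cs m (offset + 1)
      | none => goA cs m (offset + 1)
  else none
termination_by ((cs.length : Int) - offset).toNat
decreasing_by all_goals omega

def get_next_occurrence (haystack : String) (offset : Int) (needles : List String) : Option (Int × String) :=
  goA haystack.toList (firstCharMap needles) offset

-- ===== PORT B =====
-- loop body of B: pos = haystack.find(needle, offset); keep the smaller position
def stepB (cs : List Char) (offset : Int) (best : Option (Int × String)) (needle : String) : Option (Int × String) :=
  let pos := PySem.Chars.findFrom cs needle.toList offset none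
  match best with
  | none => if pos ≠ -1 then some (pos, needle) else none
  | some b => if pos ≠ -1 ∧ pos < b.1 then some (pos, needle) else some b

def get_next_occurrence_alt (haystack : String) (offset : Int) (needles : List String) : Option (Int × String) :=
  (firstCharMap needles).values.foldl (stepB haystack.toList offset) none

-- ===== PRECONDITION & SPEC =====
-- Pre_ restricts to the natural domain of this helper: it excludes empty needles
-- (A's n[0] raises IndexError) and negative offsets, on which A reads
-- haystack[offset] with Python's negative-index wraparound (raising IndexError
-- for offset < -len(haystack)) while B's str.find clamps the start.
def Pre_get_next_occurrence (haystack : String) (offset : Int) (needles : List String) : Prop :=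
  0 ≤ offset ∧ ∀ n ∈ needles, n ≠ ""
instance (haystack : String) (offset : Int) (needles : List String) : Decidable (Pre_get_next_occurrence haystack offset needles) := by unfold Pre_get_next_occurrence; infer_instance

def pvWitness_get_next_occurrence : String × Int × List String := ("ab", 0, ["b"])

def Spec_get_next_occurrence (haystack : String) (offset : Int) (needles : List String) (out : Option (Int × String)) : Prop := out = get_next_occurrence_alt haystack offset needles
instance (haystack : String) (offset : Int) (needles : List String) (out : Option (Int × String)) : Decidable (Spec_get_next_occurrence haystack offset needles out) := by unfold Spec_get_next_occurrence; infer_instance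

-- ===== CLAIM (what is proved, stated in full; the proofs are below) =====
def Claim_equal_get_next_occurrence : Prop := ∀ (haystack : String) (offset : Int) (needles : List String), Dom_get_next_occurrence haystack offset needles → Pre_get_next_occurrence haystack offset needles → Spec_get_next_occurrence haystack offset needles (get_next_occurrence haystack offset needles)

-- ===== LEMMAS AND PROOFS =====

-- a nonempty needle's map key is its first character
theorem head?_key (n : String) (h : n ≠ "") :
    n.toList.head? = some ((PySem.Str.pyGet? n 0).getD ' ') := by
  have hnl : n.toList ≠ [] := fun hh => h (String.toList_eq_nil_iff.mp hh)
  cases hcs : n.toList with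
  | nil => exact absurd hcs hnl
  | cons c t => simp [PySem.Str.pyGet?, hcs]

-- every value of the first-char map starts with its key
theorem fcm_inv_aux (l : List String) (d : PySem.Dict Char String)
    (hl : ∀ n ∈ l, n ≠ "")
    (hd : ∀ k v, d.get? k = some v → v.toList.head? = some k) :
    ∀ k v, (l.foldl (fun d n => d.insert ((PySem.Str.pyGet? n 0).getD ' ') n) d).get? k = some v →
      v.toList.head? = some k := by
  induction l generalizing d with
  | nil => exact hd
  | cons n l ih =>
    simp only [List.foldl_cons]
    apply ih _ (fun m hm => hl m (List.mem_cons_of_mem _ hm))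
    intro k v hkv
    have hn := hl n (List.mem_cons_self ..)
    by_cases hk : k = (PySem.Str.pyGet? n 0).getD ' '
    · subst hk
      rw [PySem.Dict.get?_insert_self] at hkv
      cases hkv
      exact head?_key n hn
    · rw [PySem.Dict.get?_insert_of_ne _ _ hk] at hkv
      exact hd k v hkv

theorem fcm_inv (needles : List String) (h : ∀ n ∈ needles, n ≠ "") :
    ∀ k v, (firstCharMap needles).get? k = some v → v.toList.head? = some k :=
  fcm_inv_aux needles PySem.Dict.empty h
    (by intro k v hv; simp [PySem.Dict.get?_empty] at hv)

theorem fcm_nodup_aux (l : List String) (d : PySem.Dict Char String) (hd : d.keys.Nodup) :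
    (l.foldl (fun d n => d.insert ((PySem.Str.pyGet? n 0).getD ' ') n) d).keys.Nodup := by
  induction l generalizing d with
  | nil => exact hd
  | cons n l ih => exact ih _ (PySem.Dict.nodup_keys_insert _ _ _ hd)

theorem fcm_nodup (needles : List String) : (firstCharMap needles).keys.Nodup :=
  fcm_nodup_aux needles PySem.Dict.empty PySem.Dict.nodup_keys_empty

theorem values_get? {d : PySem.Dict Char String} (hnd : d.keys.Nodup) {v : String}
    (hv : v ∈ d.values) : ∃ k, d.get? k = some v := by
  simp only [PySem.Dict.values] at hv
  rcases List.mem_map.mp hv with ⟨⟨k, w⟩, hmem, rfl⟩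
  exact ⟨k, PySem.Dict.get?_of_mem_items _ hmem hnd⟩

theorem mem_values_of_get? {d : PySem.Dict Char String} {k : Char} {v : String}
    (h : d.get? k = some v) : v ∈ d.values := by
  have := PySem.Dict.mem_items_of_get?_eq_some _ h
  simp only [PySem.Dict.values]
  exact List.mem_map.mpr ⟨(k, v), this, rfl⟩

-- str.find(sub, start) is -1 once start is past the end (sub nonempty)
theorem findFrom_past (cs sub : List Char) (o : Int) (hsub : sub ≠ [])
    (h : (cs.length : Int) ≤ o) : PySem.Chars.findFrom cs sub o none = -1 := by
  by_cases heq : o = (cs.length : Int)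
  · subst heq
    rw [show ((cs.length : Int)) = ((cs.length : Nat) : Int) from rfl]
    rw [PySem.Chars.findFrom_natCast cs sub cs.length le_rfl]
    have hfind : PySem.Chars.find ([] : List Char) sub = -1 := by
      rw [PySem.Chars.find_eq_neg_one_iff]
      simp [List.infix_nil, hsub]
    simp [hfind]
  · have hlt : (cs.length : Int) < o := lt_of_le_of_ne h (fun hh => heq hh.symm)
    unfold PySem.Chars.findFrom
    simp only []
    split_ifs <;> omega

-- spec of str.find(sub, start) for a nonnegative Int start
theorem findFrom_spec' (cs sub : List Char) (o : Int) (hsub : sub ≠ []) (h0 : 0 ≤ o)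
    (hne : PySem.Chars.findFrom cs sub o none ≠ -1) :
    o ≤ PySem.Chars.findFrom cs sub o none ∧
    sub <+: cs.drop (PySem.Chars.findFrom cs sub o none).toNat ∧
    ∀ i : Nat, o ≤ (i : Int) → i < (PySem.Chars.findFrom cs sub o none).toNat →
      ¬ sub <+: cs.drop i := by
  have hlen : o.toNat ≤ cs.length := by
    by_contra hh
    exact hne (findFrom_past cs sub o hsub (by omega))
  have ho : o = ((o.toNat : Nat) : Int) := by omega
  rw [ho] at hne ⊢
  have := PySem.Chars.findFrom_natCast_spec cs sub o.toNat hlen hne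
  exact ⟨this.1, this.2.1, fun i hi1 hi2 => this.2.2 i (by omega) hi2⟩

-- a match at the start position is found exactly there
theorem findFrom_here (cs sub : List Char) (o : Int) (h0 : 0 ≤ o)
    (hlen : o.toNat ≤ cs.length) (hm : sub <+: cs.drop o.toNat) :
    PySem.Chars.findFrom cs sub o none = o := by
  have ho : o = ((o.toNat : Nat) : Int) := by omega
  rw [ho]
  have hne : PySem.Chars.findFrom cs sub ((o.toNat : Nat) : Int) none ≠ -1 :=
    fun hh => (PySem.Chars.findFrom_natCast_eq_neg_one_iff cs sub o.toNat hlen).mp hh hm.isInfix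
  have hs := PySem.Chars.findFrom_natCast_spec cs sub o.toNat hlen hne
  set r := PySem.Chars.findFrom cs sub ((o.toNat : Nat) : Int) none with hr
  rcases lt_or_eq_of_le hs.1 with hlt | heq
  · exact absurd hm (hs.2.2 o.toNat le_rfl (by omega))
  · omega

-- no match at the start position: searching from o and from o+1 agree
theorem findFrom_shift (cs sub : List Char) (o : Int) (h0 : 0 ≤ o)
    (hlt : o < (cs.length : Int)) (hm : ¬ sub <+: cs.drop o.toNat) :
    PySem.Chars.findFrom cs sub o none = PySem.Chars.findFrom cs sub (o + 1) none := by
  have hk : o.toNat < cs.length := by omega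
  have hk1 : o.toNat + 1 ≤ cs.length := hk
  have ho : o = ((o.toNat : Nat) : Int) := by omega
  have ho1 : o + 1 = (((o.toNat + 1) : Nat) : Int) := by omega
  have hdk : cs.drop o.toNat = cs[o.toNat] :: cs.drop (o.toNat + 1) :=
    List.drop_eq_getElem_cons hk
  have hinfix : (sub <:+: cs.drop o.toNat) ↔ (sub <:+: cs.drop (o.toNat + 1)) := by
    constructor
    · intro hh
      rw [hdk] at hh
      rcases List.infix_cons_iff.mp hh with hp | hi
      · rw [← hdk] at hp; exact absurd hp hm
      · exact hi
    · intro hh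
      rw [hdk]
      exact List.infix_cons_iff.mpr (Or.inr hh)
  by_cases hz : PySem.Chars.findFrom cs sub (o + 1) none = -1
  · rw [hz, ho]
    rw [PySem.Chars.findFrom_natCast_eq_neg_one_iff cs sub o.toNat (by omega)]
    rw [ho1] at hz
    rw [PySem.Chars.findFrom_natCast_eq_neg_one_iff cs sub (o.toNat + 1) hk1] at hz
    exact fun hh => hz (hinfix.mp hh)
  · rw [ho1] at hz
    have hs1 := PySem.Chars.findFrom_natCast_spec cs sub (o.toNat + 1) hk1 hz
    set r := PySem.Chars.findFrom cs sub (((o.toNat + 1) : Nat) : Int) none with hr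
    have hne : PySem.Chars.findFrom cs sub ((o.toNat : Nat) : Int) none ≠ -1 := by
      intro hh
      apply (PySem.Chars.findFrom_natCast_eq_neg_one_iff cs sub o.toNat (by omega)).mp hh
      exact hinfix.mpr (by
        have hpre : sub <+: cs.drop r.toNat := hs1.2.1
        have hge : o.toNat + 1 ≤ r.toNat := by omega
        calc sub <:+: cs.drop r.toNat := hpre.isInfix
          _ <:+: cs.drop (o.toNat + 1) := by
              rw [show r.toNat = (o.toNat + 1) + (r.toNat - (o.toNat + 1)) by omega,
                ← List.drop_drop]
              exact (List.drop_suffix _ _).isInfix)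
    have hs2 := PySem.Chars.findFrom_natCast_spec cs sub o.toNat (by omega) hne
    set r2 := PySem.Chars.findFrom cs sub ((o.toNat : Nat) : Int) none with hr2
    have hne2 : r2.toNat ≠ o.toNat := by
      intro hh
      rw [hh] at hs2
      exact hm hs2.2.1
    have hge2 : o.toNat + 1 ≤ r2.toNat := by omega
    have hle1 : r.toNat ≤ r2.toNat := by
      by_contra hh
      exact hs1.2.2 r2.toNat (by omega) (by omega) hs2.2.1
    have hle2 : r2.toNat ≤ r.toNat := by
      by_contra hh
      exact hs2.2.2 r.toNat (by omega) (by omega) hs1.2.1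
    have ha := hs1.1
    have hb := hs2.1
    conv_lhs => rw [ho]
    conv_rhs => rw [ho1]
    rw [← hr, ← hr2]
    omega

-- A's slice comparison is exactly a prefix test at the scan position
theorem slice_eq_iff_prefix (cs : List Char) (n : String) (o : Int) (h0 : 0 ≤ o) :
    (PySem.List.slice cs (some o) (some (o + (PySem.Str.len n : Int))) = n.toList) ↔
      n.toList <+: cs.drop o.toNat := by
  rw [PySem.List.slice_toNat cs h0 (by have := PySem.Str.len_eq n; omega)]
  have hcnt : (o + (PySem.Str.len n : Int)).toNat - o.toNat = n.toList.length := by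
    have := PySem.Str.len_eq n
    omega
  rw [hcnt]
  constructor
  · intro h
    exact h ▸ List.take_prefix _ _
  · intro h
    exact (List.prefix_iff_eq_take.mp h).symm

-- a nonempty prefix of cs.drop k pins down cs[k]
theorem head_of_prefix {cs sub : List Char} {k : Nat} (hk : k < cs.length)
    (hne : sub ≠ []) (hp : sub <+: cs.drop k) : sub.head? = some cs[k] := by
  rcases hp with ⟨t, ht⟩
  have h1 : (sub ++ t).head? = sub.head? := List.head?_append_of_ne_nil _ hne
  rw [ht] at h1
  rw [← h1, List.head?_drop]
  simp [List.getElem?_eq_getElem hk]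

-- fold lemmas about B's loop
theorem foldB_keep (cs : List Char) (o : Int) (vs : List String) (b : Int × String)
    (h : ∀ v ∈ vs, PySem.Chars.findFrom cs v.toList o none = -1 ∨
         b.1 ≤ PySem.Chars.findFrom cs v.toList o none) :
    vs.foldl (stepB cs o) (some b) = some b := by
  induction vs with
  | nil => rfl
  | cons v vs ih =>
    have hv := h v (List.mem_cons_self ..)
    have hstep : stepB cs o (some b) v = some b := by
      unfold stepB
      rcases hv with hv | hv
      · simp [hv]
      · simp only []
        rw [if_neg]
        rintro ⟨h1, h2⟩; omega
    simp only [List.foldl_cons, hstep]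
    exact ih (fun w hw => h w (List.mem_cons_of_mem _ hw))

theorem foldB_none (cs : List Char) (o : Int) (vs : List String)
    (h : ∀ v ∈ vs, PySem.Chars.findFrom cs v.toList o none = -1) :
    vs.foldl (stepB cs o) none = none := by
  induction vs with
  | nil => rfl
  | cons v vs ih =>
    have hv := h v (List.mem_cons_self ..)
    have hstep : stepB cs o none v = none := by unfold stepB; simp [hv]
    simp only [List.foldl_cons, hstep]
    exact ih (fun w hw => h w (List.mem_cons_of_mem _ hw))

theorem foldB_min (cs : List Char) (o : Int) (h0 : 0 ≤ o) (vs : List String) (v0 : String)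
    (hv0 : v0 ∈ vs) (hp0 : PySem.Chars.findFrom cs v0.toList o none = o)
    (h : ∀ v ∈ vs, PySem.Chars.findFrom cs v.toList o none = -1 ∨
        (o ≤ PySem.Chars.findFrom cs v.toList o none ∧
         (PySem.Chars.findFrom cs v.toList o none = o → v = v0))) :
    ∀ acc : Option (Int × String),
      (acc = none ∨ ∃ b, acc = some b ∧ o < b.1) →
      vs.foldl (stepB cs o) acc = some (o, v0) := by
  induction vs with
  | nil => exact absurd hv0 (by simp)
  | cons v vs ih =>
    intro acc hacc
    by_cases hveq : PySem.Chars.findFrom cs v.toList o none = o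
    · have hv := (h v (List.mem_cons_self ..)).resolve_left (by rw [hveq]; omega)
      have hvv0 : v = v0 := hv.2 hveq
      subst hvv0
      have hstep : stepB cs o acc v = some (o, v) := by
        unfold stepB
        rcases hacc with rfl | ⟨b, rfl, hb⟩
        · simp only [hveq]
          rw [if_pos (by omega)]
        · simp only [hveq]
          rw [if_pos ⟨by omega, hb⟩]
      simp only [List.foldl_cons, hstep]
      exact foldB_keep cs o vs (o, v)
        (fun w hw => (h w (List.mem_cons_of_mem _ hw)).imp id (fun hh => hh.1))
    · have hv0' : v0 ∈ vs := by
        rcases List.mem_cons.mp hv0 with rfl | hh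
        · exact absurd hp0 hveq
        · exact hh
      have hstepinv : (stepB cs o acc v = none) ∨ (∃ b, stepB cs o acc v = some b ∧ o < b.1) := by
        unfold stepB
        rcases h v (List.mem_cons_self ..) with hv | hv
        · rcases hacc with rfl | ⟨b, rfl, hb⟩
          · left; simp [hv]
          · right; exact ⟨b, by simp [hv], hb⟩
        · have hgt : o < PySem.Chars.findFrom cs v.toList o none := by
            rcases lt_or_eq_of_le hv.1 with h' | h'
            · exact h'
            · exact absurd h'.symm hveq
          rcases hacc with rfl | ⟨b, rfl, hb⟩
          · by_cases hne : PySem.Chars.findFrom cs v.toList o none = -1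
            · left; simp [hne]
            · right; exact ⟨(PySem.Chars.findFrom cs v.toList o none, v), by simp [hne], hgt⟩
          · by_cases hcond : PySem.Chars.findFrom cs v.toList o none ≠ -1 ∧
              PySem.Chars.findFrom cs v.toList o none < b.1
            · right; exact ⟨(PySem.Chars.findFrom cs v.toList o none, v), by simp [hcond], hgt⟩
            · right; exact ⟨b, by simp [hcond], hb⟩
      simp only [List.foldl_cons]
      exact ih hv0' (fun w hw => h w (List.mem_cons_of_mem _ hw)) _ hstepinv

-- main induction: A's scan from offset equals B's fold of finds from offset
theorem main_aux (cs : List Char) (m : PySem.Dict Char String)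
    (hInv : ∀ k v, m.get? k = some v → v.toList.head? = some k)
    (hnd : m.keys.Nodup) :
    ∀ (d : Nat) (o : Int), 0 ≤ o → (cs.length : Int) - o ≤ (d : Int) →
      goA cs m o = m.values.foldl (stepB cs o) none := by
  have hvne : ∀ v ∈ m.values, v.toList ≠ [] := by
    intro v hv
    obtain ⟨k, hk⟩ := values_get? hnd hv
    have := hInv k v hk
    intro hh
    rw [hh] at this
    simp at this
  have hU : ∀ v ∈ m.values, ∀ (k : Nat) (hklt : k < cs.length), v.toList <+: cs.drop k →
      m.get? (cs[k]'hklt) = some v := by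
    intro v hv k hklt hp
    obtain ⟨kc, hkc⟩ := values_get? hnd hv
    have hhead := hInv kc v hkc
    have h2 := head_of_prefix hklt (hvne v hv) hp
    rw [hhead] at h2
    cases h2
    exact hkc
  intro d
  induction d with
  | zero =>
    intro o h0 hle
    rw [goA, if_neg (by omega)]
    symm
    exact foldB_none cs o _ (fun v hv => findFrom_past cs v.toList o (hvne v hv) (by omega))
  | succ d ih =>
    intro o h0 hle
    by_cases hlt : o < (cs.length : Int)
    · have hkn : o.toNat < cs.length := by omega
      have hget : PySem.List.pyGet? cs o = some (cs[o.toNat]'hkn) := by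
        have h1 := PySem.List.pyGet?_natCast cs o.toNat
        rw [List.getElem?_eq_getElem hkn] at h1
        rwa [show ((o.toNat : Nat) : Int) = o by omega] at h1
      rw [goA, if_pos hlt, hget]
      cases hm : m.get? (cs[o.toNat]'hkn) with
      | some needle =>
        simp only [hm]
        by_cases hmatch : PySem.List.slice cs (some o) (some (o + (PySem.Str.len needle : Int))) = needle.toList
        · rw [if_pos hmatch]
          symm
          have hp : needle.toList <+: cs.drop o.toNat := (slice_eq_iff_prefix cs needle o h0).mp hmatch
          have hvmem : needle ∈ m.values := mem_values_of_get? hm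
          apply foldB_min cs o h0 _ needle hvmem
            (findFrom_here cs needle.toList o h0 (by omega) hp)
            ?_ none (Or.inl rfl)
          intro v hv
          by_cases hz : PySem.Chars.findFrom cs v.toList o none = -1
          · exact Or.inl hz
          · right
            have hs := findFrom_spec' cs v.toList o (hvne v hv) h0 hz
            refine ⟨hs.1, fun he => ?_⟩
            have hpn : v.toList <+: cs.drop o.toNat := by
              have := hs.2.1
              rwa [he, show o.toNat = o.toNat from rfl] at this
            have := hU v hv o.toNat hkn hpn
            rw [hm] at this
            cases this
            rfl
        · rw [if_neg hmatch]
          have hnom : ∀ v ∈ m.values, ¬ v.toList <+: cs.drop o.toNat := by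
            intro v hv hp
            have := hU v hv o.toNat hkn hp
            rw [hm] at this
            cases this
            exact hmatch ((slice_eq_iff_prefix cs needle o h0).mpr hp)
          rw [ih (o + 1) (by omega) (by omega)]
          symm
          apply PySem.List.foldl_congr_mem
          intro acc v hv
          unfold stepB
          rw [findFrom_shift cs v.toList o h0 hlt (hnom v hv)]
      | none =>
        simp only [hm]
        have hnom : ∀ v ∈ m.values, ¬ v.toList <+: cs.drop o.toNat := by
          intro v hv hp
          have := hU v hv o.toNat hkn hp
          rw [hm] at this
          cases this
        rw [ih (o + 1) (by omega) (by omega)]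
        symm
        apply PySem.List.foldl_congr_mem
        intro acc v hv
        unfold stepB
        rw [findFrom_shift cs v.toList o h0 hlt (hnom v hv)]
    · rw [goA, if_neg hlt]
      symm
      exact foldB_none cs o _ (fun v hv => findFrom_past cs v.toList o (hvne v hv) (by omega))

-- ===== VERDICT (by name: the statement is the Claim_ definition above) =====
theorem get_next_occurrence_spec : Claim_equal_get_next_occurrence := by
  intro haystack offset needles _ hpre
  obtain ⟨h0, hne⟩ := hpre
  unfold Spec_get_next_occurrence get_next_occurrence get_next_occurrence_alt
  exact main_aux haystack.toList (firstCharMap needles)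
    (fcm_inv needles hne) (fcm_nodup needles)
    ((haystack.toList.length : Int) - offset).toNat offset h0 (by omega)
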